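-- pv_equiv track=rewrite | github.com/sirajhahmadnazeer123/Geeksforgeeks | Easy/Reverse alternate words/reverse-alternate-words.py | reverseAlternate
-- ===== SOURCE A (Python) =====
-- def reverseAlternate(Str):
--     x=[]
--     for i in Str.split():
--         x.append(i)
--     z=""
--     for i in range(0,len(x)):
--         if i%2==0:
--             z+=x[i]
--             z+=" "
--         else:
--             z+=x[i][::-1]
--             z+=" "
--     return z[:-1]
-- ===== SOURCE B (Python) =====
-- def reverseAlternate(Str):
--     def go(ws):
--         if not ws:
--             return []
--         if len(ws) == 1:
--             return [ws[0]]
--         return [ws[0], ws[1][::-1]] + go(ws[2:])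
--     return " ".join(go(Str.split()))
-- ===== Notes on version B (the rewrite author's own statement) =====
-- stated objective: alternative
-- what changed: Replaces A's index loop with its i%2 parity branch, manual space concatenation and [:-1] trim by a two-at-a-time structural recursion over the word list (keep one word, reverse the next) glued back together with str.join.
import Mathlib
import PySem

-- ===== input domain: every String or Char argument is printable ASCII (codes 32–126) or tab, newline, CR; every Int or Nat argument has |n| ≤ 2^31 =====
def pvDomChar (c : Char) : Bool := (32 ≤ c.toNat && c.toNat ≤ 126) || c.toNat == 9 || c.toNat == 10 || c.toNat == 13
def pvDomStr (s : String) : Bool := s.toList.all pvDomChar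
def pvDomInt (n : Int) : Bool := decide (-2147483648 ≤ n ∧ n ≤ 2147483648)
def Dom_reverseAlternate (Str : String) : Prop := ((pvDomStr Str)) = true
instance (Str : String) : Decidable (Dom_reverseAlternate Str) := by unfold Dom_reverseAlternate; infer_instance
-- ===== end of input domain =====

-- B replaces A's index loop with its i%2 branch and trailing-space trim by a two-at-a-time
-- structural recursion over the word list joined with " ".join (objective: alternative).

-- ===== PORT A =====
-- x[i] is always in range (i ∈ range(0, len(x))), so pyGetD with default "" is exact here.
def reverseAlternate (Str : String) : String :=
  let x := (PySem.Str.split₀ Str).foldl (fun acc i => acc ++ [i]) ([] : List String)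
  let z := (PySem.List.pyRange 0 (PySem.List.len x) 1).foldl
    (fun z i =>
      if PySem.Int.mod i 2 == 0 then
        (z ++ PySem.List.pyGetD x i "") ++ " "
      else
        (z ++ (PySem.Str.slice? (PySem.List.pyGetD x i "") none none (-1)).getD "") ++ " ")
    ""
  PySem.Str.slice z none (some (-1))

-- ===== PORT B =====
-- port of Source B's helper go: keep the first word, reverse the second, recurse on the rest
def pvGo : List String → List String
  | [] => []
  | [w] => [w]
  | a :: b :: rest => [a, (PySem.Str.slice? b none none (-1)).getD ""] ++ pvGo rest

def reverseAlternate_alt (Str : String) : String :=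
  PySem.Str.join " " (pvGo (PySem.Str.split₀ Str))

-- ===== PRECONDITION & SPEC =====
def Spec_reverseAlternate (Str : String) (out : String) : Prop := out = reverseAlternate_alt Str
instance (Str : String) (out : String) : Decidable (Spec_reverseAlternate Str out) := by unfold Spec_reverseAlternate; infer_instance

-- ===== CLAIM (what is proved, stated in full; the proofs are below) =====
def Claim_equal_reverseAlternate : Prop := ∀ (Str : String), Dom_reverseAlternate Str → Spec_reverseAlternate Str (reverseAlternate Str)

-- ===== LEMMAS AND PROOFS =====

theorem pvFoldl_append_singleton (ws acc : List String) :
    ws.foldl (fun a i => a ++ [i]) acc = acc ++ ws := by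
  induction ws generalizing acc with
  | nil => simp
  | cons w ws ih => simp [List.foldl_cons, ih]

-- the pieces of B, glued with a trailing space after each word
def pvCat : List String → String
  | [] => ""
  | w :: rest => w ++ " " ++ pvCat rest

theorem pvFoldA (full : List String) (ws : List String) (k : ℕ) (z : String)
    (hdrop : full.drop k = ws) (hk : k % 2 = 0) :
    (PySem.List.pyRange (k : ℤ) (PySem.List.len full) 1).foldl
      (fun z i =>
        if PySem.Int.mod i 2 == 0 then
          (z ++ PySem.List.pyGetD full i "") ++ " "
        else
          (z ++ (PySem.Str.slice? (PySem.List.pyGetD full i "") none none (-1)).getD "") ++ " ")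
      z = z ++ pvCat (pvGo ws) := by
  induction ws using pvGo.induct generalizing k z with
  | case1 =>
    have hlen : full.length ≤ k := by
      have := congrArg List.length hdrop; simp at this; omega
    rw [PySem.List.len_eq, PySem.List.pyRange_one_eq_nil (by exact_mod_cast hlen)]
    simp [pvGo, pvCat]
  | case2 w =>
    have hlen : full.length = k + 1 := by
      have := congrArg List.length hdrop
      simp at this; omega
    have hget : full.getD k "" = w := by
      have : full.drop k = [w] := hdrop
      have h0 : (full.drop k).getD 0 "" = w := by rw [this]; rfl
      simpa [List.getD, List.getElem?_drop] using h0
    rw [PySem.List.len_eq, hlen]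
    rw [show (((k + 1 : ℕ)) : ℤ) = (k : ℤ) + 1 by push_cast; ring,
        PySem.List.pyRange_one_singleton]
    have hmod : PySem.Int.mod (k : ℤ) 2 = 0 := by
      have : (k : ℤ) % 2 = 0 := by omega
      simpa using this
    have e1 : PySem.List.pyGetD full (k : ℤ) "" = w := by
      rw [PySem.List.pyGetD_natCast]; exact hget
    simp only [List.foldl_cons, List.foldl_nil, hmod, e1]
    have hif : ((0 : ℤ) == 0) = true := rfl
    rw [hif, if_pos rfl]
    simp [pvGo, pvCat, String.append_assoc, String.append_empty]
  | case3 a b rest ih =>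
    have hlen : k + 2 ≤ full.length := by
      have := congrArg List.length hdrop; simp at this; omega
    have hgetA : full.getD k "" = a := by
      have h0 : (full.drop k).getD 0 "" = a := by rw [hdrop]; rfl
      simpa [List.getD, List.getElem?_drop] using h0
    have hgetB : full.getD (k + 1) "" = b := by
      have h1 : (full.drop k).getD 1 "" = b := by rw [hdrop]; rfl
      simpa [List.getD, List.getElem?_drop] using h1
    have hdrop2 : full.drop (k + 2) = rest := by
      have t1 : full.drop (k + 1) = b :: rest := by
        rw [← List.tail_drop, hdrop]; rfl
      rw [show k + 2 = (k + 1) + 1 by ring, ← List.tail_drop, t1]; rfl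
    have hmodk : PySem.Int.mod (k : ℤ) 2 = 0 := by
      have : (k : ℤ) % 2 = 0 := by omega
      simpa using this
    have hmodk1 : PySem.Int.mod ((k : ℤ) + 1) 2 = 1 := by
      have : ((k : ℤ) + 1) % 2 = 1 := by omega
      simpa using this
    have hlt1 : (k : ℤ) < PySem.List.len full := by
      rw [PySem.List.len_eq]; exact_mod_cast (by omega : (k : ℤ) < (full.length : ℤ))
    have hlt2 : (k : ℤ) + 1 < PySem.List.len full := by
      rw [PySem.List.len_eq]; exact_mod_cast (by omega : (k : ℤ) + 1 < (full.length : ℤ))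
    rw [PySem.List.pyRange_one_cons hlt1, PySem.List.pyRange_one_cons hlt2]
    have e1 : PySem.List.pyGetD full (k : ℤ) "" = a := by
      rw [PySem.List.pyGetD_natCast]; exact hgetA
    have e2 : PySem.List.pyGetD full ((k : ℤ) + 1) "" = b := by
      rw [show ((k : ℤ) + 1) = ((k + 1 : ℕ) : ℤ) by push_cast; ring,
          PySem.List.pyGetD_natCast]; exact hgetB
    simp only [List.foldl_cons, hmodk, hmodk1, e1, e2]
    have hif0 : ((0 : ℤ) == 0) = true := rfl
    have hif1 : ((1 : ℤ) == 0) = false := rfl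
    rw [hif0, if_pos rfl, hif1, if_neg (by simp)]
    have := ih (k := k + 2)
      (z := z ++ a ++ " " ++ (PySem.Str.slice? b none none (-1)).getD "" ++ " ")
      (by simp only [Nat.add_comm k 2] at hdrop2 ⊢; exact hdrop2) (by omega)
    rw [show ((k : ℤ) + 1 + 1) = ((k + 2 : ℕ) : ℤ) by push_cast; ring]
    simp only [String.append_assoc] at this ⊢
    rw [this]
    simp [pvGo, pvCat, String.append_assoc]

theorem pvCat_cons_toList (w : String) (rest : List String) :
    (pvCat (w :: rest)).toList = w.toList ++ ' ' :: (pvCat rest).toList := by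
  simp [pvCat, String.toList_append]

theorem pvCat_dropLast (l : List String) :
    (pvCat l).toList.dropLast = PySem.Chars.join [' '] (l.map String.toList) := by
  induction l with
  | nil => simp [pvCat, PySem.Chars.join_nil, String.toList_empty]
  | cons w tail ih =>
    cases tail with
    | nil =>
      rw [pvCat_cons_toList]
      simp [pvCat, String.toList_empty, PySem.Chars.join_singleton]
    | cons x r =>
      rw [pvCat_cons_toList]
      have hne : (pvCat (x :: r)).toList ≠ [] := by
        rw [pvCat_cons_toList]; simp
      rw [show w.toList ++ ' ' :: (pvCat (x :: r)).toList
            = (w.toList ++ [' ']) ++ (pvCat (x :: r)).toList by simp]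
      rw [List.dropLast_append]
      simp only [List.isEmpty_eq_false_iff.mpr hne] at *
      rw [if_neg (by simpa using hne)]
      rw [ih]
      simp [PySem.Chars.join_cons_cons]

-- ===== VERDICT (by name: the statement is the Claim_ definition above) =====
theorem reverseAlternate_spec : Claim_equal_reverseAlternate := by
  intro Str _
  unfold Spec_reverseAlternate reverseAlternate reverseAlternate_alt
  set ws := PySem.Str.split₀ Str with hws
  rw [pvFoldl_append_singleton]
  simp only [List.nil_append]
  have hfold := pvFoldA ws ws 0 "" (by simp) (by simp)
  rw [show ((0 : ℤ)) = ((0 : ℕ) : ℤ) by simp] at hfold ⊢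
  rw [hfold]
  apply String.toList_inj.mp
  rw [PySem.Str.slice_to_neg_one, PySem.Str.toList_join]
  rw [show ("" : String) ++ pvCat (pvGo ws) = pvCat (pvGo ws) from by
        apply String.toList_inj.mp; simp]
  rw [pvCat_dropLast]
  rfl
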